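-- pv_equiv track=rewrite | github.com/AgoraIO/agora_doc_source | scripts/update-comment/api_comment_updater/src/injectors/platforms/base.py | _get_line_indent
-- ===== SOURCE A (Python) =====
-- def _get_line_indent(line: str) -> str:
--     """
--     获取行的缩进字符串
--
--     Args:
--         line: 代码行
--
--     Returns:
--         str: 缩进字符串（空格或制表符）
--     """
--     indent = ""
--     for char in line:
--         if char in [' ', '\t']:
--             indent += char
--         else:
--             break
--     return indent
-- ===== SOURCE B (Python) =====
-- def _get_line_indent(line: str) -> str:
--     stripped = line.lstrip(' \t')
--     return line[:len(line) - len(stripped)]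
-- ===== Notes on version B (the rewrite author's own statement) =====
-- stated objective: idiomatic
-- what changed: Replaces the explicit per-character loop with break and string concatenation by an lstrip over space-and-tab plus a prefix slice of the measured length.
import Mathlib
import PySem

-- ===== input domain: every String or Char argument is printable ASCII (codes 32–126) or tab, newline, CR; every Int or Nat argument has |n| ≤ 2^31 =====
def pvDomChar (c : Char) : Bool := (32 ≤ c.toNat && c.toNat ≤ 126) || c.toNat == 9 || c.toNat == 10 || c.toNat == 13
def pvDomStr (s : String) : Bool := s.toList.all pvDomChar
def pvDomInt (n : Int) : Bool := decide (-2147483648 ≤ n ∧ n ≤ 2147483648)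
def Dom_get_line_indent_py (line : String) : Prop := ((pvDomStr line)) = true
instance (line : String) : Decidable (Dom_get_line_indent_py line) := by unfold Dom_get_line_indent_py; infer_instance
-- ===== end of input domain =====

-- B replaces A's per-character loop with lstrip(' \t') plus a prefix slice of the measured length (idiomatic).


-- ===== PORT A =====
-- A's loop: walk the characters, append each ' '/'\t' to the accumulator, break at the first other char.
def getLineIndentLoopA : List Char → List Char → List Char
  | [], indent => indent
  | c :: cs, indent => if c == ' ' || c == '\t' then getLineIndentLoopA cs (indent ++ [c]) else indent

def get_line_indent_py (line : String) : String :=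
  String.mk (getLineIndentLoopA line.toList [])

-- ===== PORT B =====
-- line.lstrip(' \t') ported by hand as dropWhile over the char list (exact: drops exactly the leading chars in {' ','\t'}),
-- then line[:len(line) - len(stripped)] via PySem.List.slice.
def get_line_indent_py_alt (line : String) : String :=
  let stripped := line.toList.dropWhile (fun c => c == ' ' || c == '\t')
  String.mk (PySem.List.slice line.toList none (some ((line.toList.length - stripped.length : Nat) : Int)))

-- ===== PRECONDITION & SPEC =====
def Spec_get_line_indent_py (line : String) (out : String) : Prop := out = get_line_indent_py_alt line
instance (line : String) (out : String) : Decidable (Spec_get_line_indent_py line out) := by unfold Spec_get_line_indent_py; infer_instance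

-- ===== CLAIM (what is proved, stated in full; the proofs are below) =====
def Claim_equal_get_line_indent_py : Prop := ∀ (line : String), Dom_get_line_indent_py line → Spec_get_line_indent_py line (get_line_indent_py line)

-- ===== LEMMAS AND PROOFS =====
theorem getLineIndentLoopA_eq (l acc : List Char) :
    getLineIndentLoopA l acc = acc ++ l.takeWhile (fun c => c == ' ' || c == '\t') := by
  induction l generalizing acc with
  | nil => simp [getLineIndentLoopA]
  | cons c cs ih =>
    by_cases h : (c == ' ' || c == '\t') = true
    · simp [getLineIndentLoopA, h, ih]
    · simp [getLineIndentLoopA, h]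

theorem take_length_takeWhile {α : Type} (p : α → Bool) (l : List α) :
    l.take (l.takeWhile p).length = l.takeWhile p := by
  induction l with
  | nil => simp
  | cons a l ih =>
    by_cases h : p a = true
    · simp [h, ih]
    · simp [h]

-- ===== VERDICT (by name: the statement is the Claim_ definition above) =====
theorem get_line_indent_py_spec : Claim_equal_get_line_indent_py := by
  intro line _
  unfold Spec_get_line_indent_py get_line_indent_py get_line_indent_py_alt
  have hlen : (line.toList.takeWhile (fun c => c == ' ' || c == '\t')).length
      + (line.toList.dropWhile (fun c => c == ' ' || c == '\t')).length = line.toList.length := by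
    rw [← List.length_append, List.takeWhile_append_dropWhile]
  simp only [PySem.List.slice_to_natCast]
  rw [getLineIndentLoopA_eq, List.nil_append]
  have h2 : line.toList.length - (line.toList.dropWhile (fun c => c == ' ' || c == '\t')).length
      = (line.toList.takeWhile (fun c => c == ' ' || c == '\t')).length := by omega
  rw [h2, take_length_takeWhile]
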